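-- pv_equiv track=rewrite | github.com/lindsayross/mastermind | mastermind1.py | remove_solutions
-- ===== SOURCE A (Python) =====
-- def check_guess(guess, code):
-- 	black = 0 #number of correct colors in correct positions
-- 	white = 0 #number of correct colors in wrong positions
-- 	guess_remain = [] #list of guess pegs that did not earn a black key-to check for white
-- 	code_remain = [] #list of code pegs that were not guessed in the correct position
--
-- 	for g, c in zip(guess, code):
-- 		if g == c:
-- 			black += 1 #item in guess is in same position as in code
-- 		else:
-- 			guess_remain.append(g)
-- 			code_remain.append(c)
-- 	for g in guess_remain:
-- 		try:
-- 			code_remain.remove(g) #if there is a match, remove the item from the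
-- 				   #code_remain list so it cannot be matched again in error
-- 			white += 1 #item in guess is the correct color, but in the wrong position
-- 		except ValueError:
-- 			True
-- 	return [black, white]
--
-- def remove_solutions (possible_solutions, keys, guess):
-- 	bad_solutions = []
-- 	for solution in possible_solutions:
-- 		if check_guess(solution, guess) != keys:
-- 			bad_solutions.append(solution) #Remove all possible solutions that would not give
-- 				#the same score of colored and white pegs if they were the answer.
-- 	for item in bad_solutions:
-- 		possible_solutions.remove(item)#remove bad_solutions from possible_solutions list
-- 	return possible_solutions
-- ===== SOURCE B (Python) =====
-- # Same scoring/filtering, but check_guess counts whites by frequency-table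
-- # intersection (min of per-colour counts from two dicts) instead of the greedy
-- # remove() pass, and remove_solutions filters in one comprehension (still
-- # mutating the passed-in list in place).
-- def check_guess(guess, code):
--     black = 0
--     guess_counts = {}
--     code_counts = {}
--     for g, c in zip(guess, code):
--         if g == c:
--             black += 1
--         else:
--             guess_counts[g] = guess_counts.get(g, 0) + 1
--             code_counts[c] = code_counts.get(c, 0) + 1
--     white = sum(min(n, code_counts.get(g, 0)) for g, n in guess_counts.items())
--     return [black, white]
--
-- def remove_solutions(possible_solutions, keys, guess):
--     possible_solutions[:] = [s for s in possible_solutions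
--                              if check_guess(s, guess) == keys]
--     return possible_solutions
-- ===== Notes on version B (the rewrite author's own statement) =====
-- stated objective: faster
-- what changed: check_guess scores whites by frequency-table intersection (two count dicts built in one pass, then sum of per-colour minima) instead of A's greedy quadratic list.remove pass, and remove_solutions keeps matching solutions with one in-place filtering comprehension instead of collecting bad solutions and calling list.remove for each.
import Mathlib
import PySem

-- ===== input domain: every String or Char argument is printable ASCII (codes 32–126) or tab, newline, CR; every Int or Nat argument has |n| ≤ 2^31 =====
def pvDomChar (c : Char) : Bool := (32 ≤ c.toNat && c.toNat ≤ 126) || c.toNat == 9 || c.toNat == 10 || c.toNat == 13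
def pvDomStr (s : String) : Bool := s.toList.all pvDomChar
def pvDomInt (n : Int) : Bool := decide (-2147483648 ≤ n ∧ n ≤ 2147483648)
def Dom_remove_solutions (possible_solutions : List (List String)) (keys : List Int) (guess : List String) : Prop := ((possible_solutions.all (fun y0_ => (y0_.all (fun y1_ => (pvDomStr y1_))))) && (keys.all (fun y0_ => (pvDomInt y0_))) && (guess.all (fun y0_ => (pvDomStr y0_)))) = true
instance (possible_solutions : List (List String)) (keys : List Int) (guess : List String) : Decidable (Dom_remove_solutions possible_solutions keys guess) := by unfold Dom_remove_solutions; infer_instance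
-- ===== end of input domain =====

-- B scores a guess by frequency-table intersection (min of per-colour counts from two
-- dicts) instead of A's greedy remove() pass, and filters in one comprehension;
-- both Pythons mutate possible_solutions in place, and the equivalence proved is about
-- the returned list (which is also the final in-place contents for both).

-- ===== PORT A =====
def check_guess (guess code : List String) : List Int :=
  let s1 := (guess.zip code).foldl
    (fun (st : Int × List String × List String) (p : String × String) =>
      if p.1 == p.2 then (st.1 + 1, st.2.1, st.2.2)
      else (st.1, st.2.1 ++ [p.1], st.2.2 ++ [p.2]))
    (0, [], [])
  -- try/except ValueError: PySem.List.remove? returns none exactly where Python's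
  -- list.remove raises ValueError; A catches it and does nothing, hence the none branch
  let s2 := s1.2.1.foldl
    (fun (st : List String × Int) (g : String) =>
      match PySem.List.remove? st.1 g with
      | some rest => (rest, st.2 + 1)
      | none => st)
    (s1.2.2, 0)
  [s1.1, s2.2]

def remove_solutions (possible_solutions : List (List String)) (keys : List Int) (guess : List String) : List (List String) :=
  let bad := possible_solutions.foldl
    (fun acc solution => if check_guess solution guess != keys then acc ++ [solution] else acc) []
  -- every bad item is (an occurrence) still in the list, so Python's .remove never
  -- raises here; the none branch of remove? is unreachable
  bad.foldl (fun acc item => (PySem.List.remove? acc item).getD acc) possible_solutions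

-- ===== PORT B =====
def check_guess_alt (guess code : List String) : List Int :=
  let st := (guess.zip code).foldl
    (fun (st : Int × PySem.Dict String Int × PySem.Dict String Int) (p : String × String) =>
      if p.1 == p.2 then (st.1 + 1, st.2.1, st.2.2)
      else (st.1,
            st.2.1.insert p.1 (st.2.1.getD p.1 0 + 1),
            st.2.2.insert p.2 (st.2.2.getD p.2 0 + 1)))
    (0, PySem.Dict.empty, PySem.Dict.empty)
  let white : Int := (st.2.1.items.map (fun kv => min kv.2 (st.2.2.getD kv.1 0))).sum
  [st.1, white]

def remove_solutions_alt (possible_solutions : List (List String)) (keys : List Int) (guess : List String) : List (List String) :=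
  possible_solutions.filter (fun s => check_guess_alt s guess == keys)

-- ===== PRECONDITION & SPEC =====
def Spec_remove_solutions (possible_solutions : List (List String)) (keys : List Int) (guess : List String) (out : List (List String)) : Prop := out = remove_solutions_alt possible_solutions keys guess
instance (possible_solutions : List (List String)) (keys : List Int) (guess : List String) (out : List (List String)) : Decidable (Spec_remove_solutions possible_solutions keys guess out) := by unfold Spec_remove_solutions; infer_instance

-- ===== CLAIM (what is proved, stated in full; the proofs are below) =====
def Claim_equal_remove_solutions : Prop := ∀ (possible_solutions : List (List String)) (keys : List Int) (guess : List String), Dom_remove_solutions possible_solutions keys guess → Spec_remove_solutions possible_solutions keys guess (remove_solutions possible_solutions keys guess)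

-- ===== LEMMAS AND PROOFS =====

-- A's first loop builds (count of equal pairs, unmatched firsts, unmatched seconds).
lemma loopA_eq (l : List (String × String)) (b : Int) (gr cr : List String) :
    l.foldl
      (fun (st : Int × List String × List String) (p : String × String) =>
        if p.1 == p.2 then (st.1 + 1, st.2.1, st.2.2)
        else (st.1, st.2.1 ++ [p.1], st.2.2 ++ [p.2]))
      (b, gr, cr)
    = (b + (l.countP (fun p => p.1 == p.2) : Int),
       gr ++ (l.filter (fun p => p.1 != p.2)).map Prod.fst,
       cr ++ (l.filter (fun p => p.1 != p.2)).map Prod.snd) := by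
  induction l generalizing b gr cr with
  | nil => simp
  | cons p l ih =>
    rw [List.foldl_cons]
    by_cases h : (p.1 == p.2) = true
    · rw [if_pos h, ih]
      have heq : p.1 = p.2 := by simpa using h
      simp only [heq, List.countP_cons, List.filter_cons, Prod.ext_iff]
      refine ⟨by simp; omega, by simp, by simp⟩
    · rw [if_neg h, ih]
      simp [h, bne]

-- A's greedy removal loop counts the multiset intersection.
lemma greedy_eq (gr : List String) : ∀ (cr : List String) (w : Int),
    (gr.foldl
      (fun (st : List String × Int) (g : String) =>
        match PySem.List.remove? st.1 g with
        | some rest => (rest, st.2 + 1)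
        | none => st)
      (cr, w)).2
    = w + (((gr : Multiset String) ∩ (cr : Multiset String)).card : Int) := by
  induction gr with
  | nil => intro cr w; simp
  | cons g gr ih =>
    intro cr w
    by_cases h : g ∈ cr
    · rw [List.foldl_cons]
      dsimp only
      rw [PySem.List.remove?_eq_some_erase cr g h]
      dsimp only
      rw [ih (cr.erase g) (w + 1)]
      have : ((g :: gr : List String) : Multiset String) ∩ (cr : Multiset String)
          = g ::ₘ ((gr : Multiset String) ∩ ((cr : Multiset String).erase g)) := by
        rw [← Multiset.cons_coe, Multiset.cons_inter_of_pos _ h]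
      rw [this, Multiset.card_cons, ← Multiset.coe_erase]
      push_cast; ring
    · rw [List.foldl_cons]
      dsimp only
      rw [(PySem.List.remove?_eq_none_iff cr g).2 h]
      dsimp only
      rw [ih cr w]
      have : ((g :: gr : List String) : Multiset String) ∩ (cr : Multiset String)
          = (gr : Multiset String) ∩ (cr : Multiset String) := by
        rw [← Multiset.cons_coe, Multiset.cons_inter_of_neg _ h]
      rw [this]

-- B's first loop builds (count of equal pairs, counter of unmatched firsts, counter of
-- unmatched seconds).
lemma loopB_eq (l : List (String × String)) (b : Int) (d1 d2 : PySem.Dict String Int) :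
    l.foldl
      (fun (st : Int × PySem.Dict String Int × PySem.Dict String Int) (p : String × String) =>
        if p.1 == p.2 then (st.1 + 1, st.2.1, st.2.2)
        else (st.1,
              st.2.1.insert p.1 (st.2.1.getD p.1 0 + 1),
              st.2.2.insert p.2 (st.2.2.getD p.2 0 + 1)))
      (b, d1, d2)
    = (b + (l.countP (fun p => p.1 == p.2) : Int),
       ((l.filter (fun p => p.1 != p.2)).map Prod.fst).foldl
         (fun d x => d.insert x (d.getD x 0 + 1)) d1,
       ((l.filter (fun p => p.1 != p.2)).map Prod.snd).foldl
         (fun d x => d.insert x (d.getD x 0 + 1)) d2) := by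
  induction l generalizing b d1 d2 with
  | nil => simp
  | cons p l ih =>
    rw [List.foldl_cons]
    by_cases h : (p.1 == p.2) = true
    · rw [if_pos h, ih]
      have heq : p.1 = p.2 := by simpa using h
      simp only [heq, List.countP_cons, List.filter_cons, Prod.ext_iff]
      refine ⟨by simp; omega, by simp, by simp⟩
    · rw [if_neg h, ih]
      simp [h, bne]

-- B's Σ min of counts over the distinct unmatched colours is the same intersection
-- cardinality that A's greedy loop computes.
lemma summin_eq (gr cr : List String) :
    ((PySem.Set.ofList gr).map
      (fun x => min ((gr.count x : Int)) ((cr.count x : Int)))).sum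
    = (((gr : Multiset String) ∩ (cr : Multiset String)).card : Int) := by
  have hnd : (PySem.Set.ofList gr).Nodup := PySem.Set.nodup_ofList gr
  have hfin : (PySem.Set.ofList gr).toFinset = gr.toFinset := by
    ext x
    simp [List.mem_toFinset, PySem.Set.mem_ofList]
  have hsum :
      ((PySem.Set.ofList gr).map
        (fun x => min ((gr.count x : Int)) ((cr.count x : Int)))).sum
      = ∑ x ∈ gr.toFinset, min ((gr.count x : Int)) ((cr.count x : Int)) := by
    rw [← hfin, ← List.sum_toFinset _ hnd]
  rw [hsum]
  have hcard : (((gr : Multiset String) ∩ (cr : Multiset String)).card : Int)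
      = ∑ x ∈ gr.toFinset, ((((gr : Multiset String) ∩ (cr : Multiset String)).count x : Int)) := by
    rw [← Nat.cast_sum]
    congr 1
    rw [← Multiset.toFinset_sum_count_eq ((gr : Multiset String) ∩ (cr : Multiset String))]
    apply Finset.sum_subset
    · intro x hx
      simp only [Multiset.mem_toFinset, Multiset.mem_inter] at hx
      simp [List.mem_toFinset, ← Multiset.mem_coe, hx.1]
    · intro x _ hx
      simp only [Multiset.mem_toFinset] at hx
      exact Multiset.count_eq_zero_of_notMem hx
  rw [hcard]
  apply Finset.sum_congr rfl
  intro x _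
  rw [Multiset.count_inter]
  simp [Multiset.coe_count, Nat.cast_min]

-- the two scorers agree on every pair of rows
lemma check_guess_eq (guess code : List String) :
    check_guess guess code = check_guess_alt guess code := by
  unfold check_guess check_guess_alt
  simp only [loopA_eq, loopB_eq, List.nil_append,
    PySem.Dict.foldl_insert_getD_add_one_eq_counter, PySem.Dict.items_counter,
    List.map_map, greedy_eq]
  have : ∀ (gr cr : List String),
      ((PySem.Set.ofList gr).map
        ((fun kv : String × Int => min kv.2 ((PySem.Dict.counter cr).getD kv.1 0)) ∘
          fun k => (k, (List.count k gr : Int)))).sum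
      = (((gr : Multiset String) ∩ (cr : Multiset String)).card : Int) := by
    intro gr cr
    rw [← summin_eq gr cr]
    apply congrArg
    apply List.map_congr_left
    intro x _
    simp [PySem.Dict.getD_counter]
  rw [this]
  simp

-- removing, in order, the occurrences selected by a filter leaves the complement
lemma remove_filter (p : List String → Bool) : ∀ (xs : List (List String)),
    (xs.filter p).foldl (fun acc item => (PySem.List.remove? acc item).getD acc) xs
    = xs.filter (fun x => !(p x)) := by
  have step : ∀ (l : List (List String)) (x : List String) (acc : List (List String)),
      (∀ i ∈ l, x ≠ i) →
      l.foldl (fun acc item => (PySem.List.remove? acc item).getD acc) (x :: acc)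
      = x :: l.foldl (fun acc item => (PySem.List.remove? acc item).getD acc) acc := by
    intro l
    induction l with
    | nil => intro x acc _; rfl
    | cons i l ih =>
      intro x acc hne
      rw [List.foldl_cons, List.foldl_cons]
      have hx : x ≠ i := hne i (by simp)
      rw [PySem.List.remove?_cons_of_ne acc hx]
      cases hr : PySem.List.remove? acc i with
      | some rest =>
        simp only [Option.map_some, Option.getD_some]
        exact ih x rest (fun j hj => hne j (by simp [hj]))
      | none =>
        simp only [Option.map_none, Option.getD_none]
        exact ih x acc (fun j hj => hne j (by simp [hj]))
  intro xs
  induction xs with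
  | nil => rfl
  | cons x xs ih =>
    by_cases h : p x
    · rw [List.filter_cons_of_pos h, List.foldl_cons, PySem.List.remove?_cons_self,
        Option.getD_some, ih, List.filter_cons_of_neg (by simp [h])]
    · rw [List.filter_cons_of_neg h,
        step (xs.filter p) x xs (by
          intro i hi hxi
          rw [List.mem_filter] at hi
          exact h (hxi ▸ hi.2)),
        ih, List.filter_cons_of_pos (by simp [h])]

-- ===== VERDICT (by name: the statement is the Claim_ definition above) =====
theorem remove_solutions_spec : Claim_equal_remove_solutions := by
  intro ps keys guess _
  show remove_solutions ps keys guess = remove_solutions_alt ps keys guess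
  unfold remove_solutions remove_solutions_alt
  simp only [PySem.List.foldl_append_if, List.nil_append, List.map_id']
  have hp : ∀ s, (check_guess s guess != keys) = !(check_guess_alt s guess == keys) := by
    intro s; rw [check_guess_eq]; simp [bne]
  simp only [hp]
  rw [remove_filter (fun s => !(check_guess_alt s guess == keys)) ps]
  simp
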